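-- pv_equiv track=rewrite | github.com/blackulaphoto/cmsx | backend/api/unified_client_api_fixed.py | _calculate_task_statistics
-- ===== SOURCE A (Python) =====
-- from typing import Dict, List, Any, Optional
--
-- def _calculate_task_statistics(tasks: List[Dict[str, Any]]) -> Dict[str, Any]:
--     """Helper function to calculate task statistics"""
--     if not tasks:
--         return {
--             "total_tasks": 0,
--             "high_priority": 0,
--             "medium_priority": 0,
--             "low_priority": 0,
--             "pending_tasks": 0,
--             "completed_tasks": 0
--         }
--
--     high_priority = len([t for t in tasks if t.get('priority', '').lower() == 'high'])
--     medium_priority = len([t for t in tasks if t.get('priority', '').lower() == 'medium'])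
--     low_priority = len([t for t in tasks if t.get('priority', '').lower() == 'low'])
--     pending_tasks = len([t for t in tasks if t.get('status', '').lower() == 'pending'])
--     completed_tasks = len([t for t in tasks if t.get('status', '').lower() == 'completed'])
--
--     return {
--         "total_tasks": len(tasks),
--         "high_priority": high_priority,
--         "medium_priority": medium_priority,
--         "low_priority": low_priority,
--         "pending_tasks": pending_tasks,
--         "completed_tasks": completed_tasks
--     }
-- ===== SOURCE B (Python) =====
-- def _calculate_task_statistics(tasks):
--     """One pass: build two counting tables (priority, status), then read the stats off them."""
--     prio = {}
--     status = {}
--     for t in tasks: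
--         p = t.get('priority', '').lower()
--         s = t.get('status', '').lower()
--         prio[p] = prio.get(p, 0) + 1
--         status[s] = status.get(s, 0) + 1
--     return {
--         "total_tasks": len(tasks),
--         "high_priority": prio.get('high', 0),
--         "medium_priority": prio.get('medium', 0),
--         "low_priority": prio.get('low', 0),
--         "pending_tasks": status.get('pending', 0),
--         "completed_tasks": status.get('completed', 0),
--     }
-- ===== Notes on version B (the rewrite author's own statement) =====
-- stated objective: alternative
-- what changed: Replaces five separate filtering passes over tasks with a single pass that builds two counting dicts (priority, status) and then reads the six statistics off them.
import Mathlib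
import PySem

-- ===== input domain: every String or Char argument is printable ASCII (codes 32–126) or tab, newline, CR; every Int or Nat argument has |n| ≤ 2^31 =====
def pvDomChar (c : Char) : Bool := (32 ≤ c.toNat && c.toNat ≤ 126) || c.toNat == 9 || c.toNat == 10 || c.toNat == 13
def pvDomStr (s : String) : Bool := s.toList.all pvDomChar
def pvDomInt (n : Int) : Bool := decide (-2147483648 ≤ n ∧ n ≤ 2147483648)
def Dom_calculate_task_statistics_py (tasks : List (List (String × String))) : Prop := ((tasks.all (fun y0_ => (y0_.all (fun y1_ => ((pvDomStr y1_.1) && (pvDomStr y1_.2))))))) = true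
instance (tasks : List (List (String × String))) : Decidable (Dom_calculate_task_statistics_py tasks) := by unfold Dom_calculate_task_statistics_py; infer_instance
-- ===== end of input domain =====

-- B replaces A's five filtering passes by one pass building two counting dicts, then a readout (same results, same asymptotic cost).


-- shared helper: t.get(k, '').lower()  (first-match lookup, as Python dicts have unique keys)
def pvGetLower (t : List (String × String)) (k : String) : String :=
  PySem.Str.lower ((PySem.Dict.mk t).getD k "")

-- ===== PORT A =====
def calculate_task_statistics_py (tasks : List (List (String × String))) : List (String × Int) :=
  if tasks = [] then
    [("total_tasks", 0), ("high_priority", 0), ("medium_priority", 0),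
     ("low_priority", 0), ("pending_tasks", 0), ("completed_tasks", 0)]
  else
    let high_priority : Int := (tasks.filter (fun t => pvGetLower t "priority" == "high")).length
    let medium_priority : Int := (tasks.filter (fun t => pvGetLower t "priority" == "medium")).length
    let low_priority : Int := (tasks.filter (fun t => pvGetLower t "priority" == "low")).length
    let pending_tasks : Int := (tasks.filter (fun t => pvGetLower t "status" == "pending")).length
    let completed_tasks : Int := (tasks.filter (fun t => pvGetLower t "status" == "completed")).length
    [("total_tasks", (tasks.length : Int)), ("high_priority", high_priority),
     ("medium_priority", medium_priority), ("low_priority", low_priority),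
     ("pending_tasks", pending_tasks), ("completed_tasks", completed_tasks)]

-- ===== PORT B =====
def calculate_task_statistics_py_alt (tasks : List (List (String × String))) : List (String × Int) :=
  let ds := tasks.foldl
    (fun (ds : PySem.Dict String Int × PySem.Dict String Int) t =>
      let p := pvGetLower t "priority"
      let s := pvGetLower t "status"
      (ds.1.insert p (ds.1.getD p 0 + 1), ds.2.insert s (ds.2.getD s 0 + 1)))
    (PySem.Dict.empty, PySem.Dict.empty)
  [("total_tasks", (tasks.length : Int)),
   ("high_priority", ds.1.getD "high" 0),
   ("medium_priority", ds.1.getD "medium" 0),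
   ("low_priority", ds.1.getD "low" 0),
   ("pending_tasks", ds.2.getD "pending" 0),
   ("completed_tasks", ds.2.getD "completed" 0)]

-- ===== PRECONDITION & SPEC =====
def Spec_calculate_task_statistics_py (tasks : List (List (String × String))) (out : List (String × Int)) : Prop := out = calculate_task_statistics_py_alt tasks
instance (tasks : List (List (String × String))) (out : List (String × Int)) : Decidable (Spec_calculate_task_statistics_py tasks out) := by unfold Spec_calculate_task_statistics_py; infer_instance

-- ===== CLAIM (what is proved, stated in full; the proofs are below) =====
def Claim_equal_calculate_task_statistics_py : Prop := ∀ (tasks : List (List (String × String))), Dom_calculate_task_statistics_py tasks → Spec_calculate_task_statistics_py tasks (calculate_task_statistics_py tasks)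

-- ===== LEMMAS AND PROOFS =====

-- B's paired fold splits into two independent folds.
theorem pv_fold_pair (tasks : List (List (String × String)))
    (d1 d2 : PySem.Dict String Int) :
    tasks.foldl
      (fun (ds : PySem.Dict String Int × PySem.Dict String Int) t =>
        let p := pvGetLower t "priority"
        let s := pvGetLower t "status"
        (ds.1.insert p (ds.1.getD p 0 + 1), ds.2.insert s (ds.2.getD s 0 + 1)))
      (d1, d2)
    = (tasks.foldl (fun d t => d.insert (pvGetLower t "priority") (d.getD (pvGetLower t "priority") 0 + 1)) d1,
       tasks.foldl (fun d t => d.insert (pvGetLower t "status") (d.getD (pvGetLower t "status") 0 + 1)) d2) := by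
  induction tasks generalizing d1 d2 with
  | nil => rfl
  | cons t rest ih => simp [List.foldl, ih]

-- the counter fold read at v gives the filter-length A computes
theorem pv_fold_count_gen (tasks : List (List (String × String))) (k v : String)
    (d : PySem.Dict String Int) :
    (tasks.foldl (fun d t => d.insert (pvGetLower t k) (d.getD (pvGetLower t k) 0 + 1)) d).getD v 0
    = d.getD v 0 + ((tasks.filter (fun t => pvGetLower t k == v)).length : Int) := by
  induction tasks generalizing d with
  | nil => simp
  | cons t rest ih =>
    simp only [List.foldl_cons, ih, List.filter_cons]
    by_cases h : pvGetLower t k = v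
    · simp [h, PySem.Dict.getD_insert_self]; ring
    · rw [PySem.Dict.getD_insert_of_ne]
      · simp [h]
      · simpa using (Ne.symm h)

theorem pv_fold_count (tasks : List (List (String × String))) (k v : String) :
    (tasks.foldl (fun d t => d.insert (pvGetLower t k) (d.getD (pvGetLower t k) 0 + 1))
      (PySem.Dict.empty : PySem.Dict String Int)).getD v 0
    = ((tasks.filter (fun t => pvGetLower t k == v)).length : Int) := by
  rw [pv_fold_count_gen]; simp

-- ===== VERDICT (by name: the statement is the Claim_ definition above) =====
theorem calculate_task_statistics_py_spec : Claim_equal_calculate_task_statistics_py := by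
  intro tasks _
  unfold Spec_calculate_task_statistics_py calculate_task_statistics_py calculate_task_statistics_py_alt
  rw [pv_fold_pair]
  by_cases h : tasks = []
  · subst h; decide
  · simp only [if_neg h, pv_fold_count]
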